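-- pv_equiv track=rewrite | github.com/ghwshin/viewranking | main_engine.py | ranklist_to_string
-- ===== SOURCE A (Python) =====
-- def ranklist_to_string(rank_list):
--     _restr = str()
--     for rank in rank_list:
--         if rank != -1:
--             _restr += (str(rank) + ",")
--         else:
--             _restr = ","
--     return _restr[0:len(_restr) - 1]
-- ===== SOURCE B (Python) =====
-- def ranklist_to_string(rank_list):
--     last = -1
--     for i, r in enumerate(rank_list):
--         if r == -1:
--             last = i
--     parts = [str(r) for r in rank_list[last + 1:]]
--     if last != -1:
--         parts = [""] + parts
--     return ",".join(parts)
-- ===== Notes on version B (the rewrite author's own statement) =====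
-- stated objective: alternative
-- what changed: Instead of accumulating a string and resetting it on each -1, B finds the index of the last -1, str-maps only the suffix after it, prepends an empty part when a reset occurred, and joins with commas (no trailing-comma strip needed).
import Mathlib
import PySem

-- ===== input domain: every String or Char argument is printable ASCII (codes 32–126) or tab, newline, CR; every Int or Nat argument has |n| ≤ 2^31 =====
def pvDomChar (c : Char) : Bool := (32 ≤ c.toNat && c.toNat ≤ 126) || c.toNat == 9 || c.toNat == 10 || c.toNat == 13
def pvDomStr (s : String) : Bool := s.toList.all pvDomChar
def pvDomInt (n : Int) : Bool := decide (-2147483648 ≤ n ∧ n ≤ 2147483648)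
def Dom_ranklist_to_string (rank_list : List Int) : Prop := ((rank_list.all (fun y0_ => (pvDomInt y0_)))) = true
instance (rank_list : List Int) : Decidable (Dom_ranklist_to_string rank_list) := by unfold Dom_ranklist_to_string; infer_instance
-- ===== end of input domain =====

-- B replaces A's reset-accumulating string pass by: locate the last -1, str-map the suffix
-- after it, prepend an empty part when a reset occurred, and comma-join (objective: alternative).


-- ===== PORT A =====
-- Strings are carried as List Char (PySem.Chars); '+=' is list append.
-- stripTrailA is the final  _restr[0:len(_restr)-1]  (PySem.List.slice on the characters).
def stripTrailA (restr : List Char) : String :=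
  String.ofList (PySem.List.slice restr (some 0) (some ((restr.length : Int) - 1)))

def ranklist_to_string (rank_list : List Int) : String :=
  stripTrailA
    (rank_list.foldl
      (fun s rank => if rank ≠ -1 then s ++ (PySem.Int.toChars rank ++ [',']) else [','])
      [])

-- ===== PORT B =====
-- joinPartsB is Source B after the last-index loop: slice the suffix, map str, prepend "" on reset, join.
def joinPartsB (rank_list : List Int) (last : Int) : String :=
  let parts : List (List Char) :=
    (PySem.List.slice rank_list (some (last + 1)) none).map PySem.Int.toChars
  let parts := if last ≠ -1 then [] :: parts else parts
  String.ofList (PySem.Chars.join [','] parts)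

def ranklist_to_string_alt (rank_list : List Int) : String :=
  joinPartsB rank_list
    ((PySem.List.enumerate rank_list 0).foldl
      (fun acc p => if p.2 = -1 then p.1 else acc) (-1))

-- ===== PRECONDITION & SPEC =====
def Spec_ranklist_to_string (rank_list : List Int) (out : String) : Prop := out = ranklist_to_string_alt rank_list
instance (rank_list : List Int) (out : String) : Decidable (Spec_ranklist_to_string rank_list out) := by unfold Spec_ranklist_to_string; infer_instance

-- ===== CLAIM (what is proved, stated in full; the proofs are below) =====
def Claim_equal_ranklist_to_string : Prop := ∀ (rank_list : List Int), Dom_ranklist_to_string rank_list → Spec_ranklist_to_string rank_list (ranklist_to_string rank_list)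

-- ===== LEMMAS AND PROOFS =====

-- the suffix of l strictly after the last occurrence of -1 (l itself if there is none)
def tailAfter : List Int → List Int
  | [] => []
  | r :: t => if (-1 : Int) ∈ t then tailAfter t else if r = -1 then t else r :: tailAfter t

-- the comma-terminated rendering A's loop appends
def renderC (u : List Int) : List Char := u.flatMap (fun r => PySem.Int.toChars r ++ [','])

lemma renderC_nil : renderC [] = [] := rfl

lemma renderC_cons (r : Int) (t : List Int) :
    renderC (r :: t) = PySem.Int.toChars r ++ [','] ++ renderC t := by
  simp [renderC]

lemma renderC_ne_nil (r : Int) (t : List Int) : renderC (r :: t) ≠ [] := by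
  simp [renderC_cons]

lemma tailAfter_of_not_mem (l : List Int) (h : (-1 : Int) ∉ l) : tailAfter l = l := by
  induction l with
  | nil => rfl
  | cons r t ih =>
    simp only [List.mem_cons, not_or] at h
    have hr : ¬ r = -1 := fun h' => h.1 h'.symm
    simp [tailAfter, h.2, hr, ih h.2]

lemma tailAfter_append_neg_one (u : List Int) : tailAfter (u ++ [(-1 : Int)]) = [] := by
  induction u with
  | nil => simp [tailAfter]
  | cons r u' ihu => simp [tailAfter, List.mem_append, ihu]

lemma tailAfter_append_singleton (t : List Int) (x : Int) (hx : x ≠ -1) :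
    tailAfter (t ++ [x]) = tailAfter t ++ [x] := by
  have hx' : ¬ (-1 : Int) = x := fun h' => hx h'.symm
  induction t with
  | nil => simp [tailAfter, hx]
  | cons r t' iht =>
    by_cases hm' : (-1 : Int) ∈ t'
    · simp [tailAfter, List.mem_append, hm', hx', iht]
    · by_cases hr : r = -1
      · simp [tailAfter, List.mem_append, hm', hx', hr]
      · simp [tailAfter, List.mem_append, hm', hx', hr, iht]

-- A's loop, characterised
lemma foldA (l : List Int) (s : List Char) :
    l.foldl (fun s rank => if rank ≠ -1 then s ++ (PySem.Int.toChars rank ++ [',']) else [',']) s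
      = (if (-1 : Int) ∈ l then [','] else s) ++ renderC (tailAfter l) := by
  induction l generalizing s with
  | nil => simp [tailAfter, renderC_nil]
  | cons r t ih =>
    rw [List.foldl_cons]
    by_cases hr : r = -1
    · rw [if_neg (not_not_intro hr), ih]
      by_cases hm : (-1 : Int) ∈ t
      · simp [tailAfter, hm, hr]
      · simp [tailAfter, hm, hr, tailAfter_of_not_mem t hm]
    · have hr' : ¬ (-1 : Int) = r := fun h' => hr h'.symm
      rw [if_pos hr, ih]
      by_cases hm : (-1 : Int) ∈ t
      · simp [tailAfter, hm, hr']
      · simp [tailAfter, hm, hr, hr', renderC_cons, List.append_assoc]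

-- dropping the trailing comma of the rendering is the comma-join of the parts
lemma dropLast_renderC (u : List Int) :
    (renderC u).dropLast = PySem.Chars.join [','] (u.map PySem.Int.toChars) := by
  induction u with
  | nil => simp [renderC_nil, PySem.Chars.join_nil]
  | cons r t ih =>
    cases t with
    | nil =>
      simp [renderC_cons, renderC_nil, PySem.Chars.join_singleton]
    | cons h t' =>
      rw [renderC_cons, List.append_assoc,
        List.dropLast_append_of_ne_nil (by
          intro hc
          exact renderC_ne_nil h t' (by simpa using congrArg List.tail hc)),
        List.dropLast_append_of_ne_nil (renderC_ne_nil h t')]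
      simp [PySem.Chars.join_cons_cons, ih, List.append_assoc]

lemma dropLast_comma_renderC (u : List Int) :
    ([','] ++ renderC u).dropLast
      = PySem.Chars.join [','] ([] :: u.map PySem.Int.toChars) := by
  cases u with
  | nil => simp [renderC_nil, PySem.Chars.join_singleton]
  | cons r t =>
    rw [List.dropLast_append_of_ne_nil (renderC_ne_nil r t)]
    simp [PySem.Chars.join_cons_cons, dropLast_renderC]

-- the final slice [0:len-1] is dropLast
lemma slice_len_sub_one {α : Type} (xs : List α) :
    PySem.List.slice xs (some 0) (some ((xs.length : Int) - 1)) = xs.dropLast := by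
  cases xs with
  | nil => simp [PySem.List.slice]
  | cons x t =>
    rw [PySem.List.slice_zero_start]
    have h1 : ((x :: t).length : Int) - 1 = ((t.length : Nat) : Int) := by
      push_cast [List.length_cons]; ring
    rw [h1, PySem.List.slice_to_natCast]
    simp [List.dropLast_eq_take]

-- B's last-index fold, characterised together with the slice it induces
lemma lastIdx_spec (l : List Int) :
    ((-1 : Int) ∉ l →
        (PySem.List.enumerate l 0).foldl (fun acc p => if p.2 = -1 then p.1 else acc) (-1) = -1)
    ∧ ((-1 : Int) ∈ l →
        ∃ k : Nat, k < l.length ∧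
          (PySem.List.enumerate l 0).foldl (fun acc p => if p.2 = -1 then p.1 else acc) (-1)
            = (k : Int) ∧
          l.drop (k + 1) = tailAfter l) := by
  induction l using List.reverseRecOn with
  | nil => exact ⟨fun _ => rfl, fun h => absurd h (by simp)⟩
  | append_singleton t x ih =>
    rw [PySem.List.enumerate_append, List.foldl_append]
    by_cases hx : x = -1
    · subst hx
      refine ⟨fun h => absurd (by simp) h, fun _ => ?_⟩
      refine ⟨t.length, by simp, by simp [PySem.List.enumerate], ?_⟩
      simp [tailAfter_append_neg_one, List.drop_eq_nil_of_le]
    · have hTA := tailAfter_append_singleton t x hx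
      constructor
      · intro h
        have hmt : (-1 : Int) ∉ t := fun hm => h (by simp [hm])
        simp [PySem.List.enumerate, hx, ih.1 hmt]
      · intro h
        have hmt : (-1 : Int) ∈ t := by
          rcases List.mem_append.mp h with h' | h'
          · exact h'
          · exact absurd ((by simpa using h' : (-1 : Int) = x)).symm hx
        obtain ⟨k, hk, hfold, hdrop⟩ := ih.2 hmt
        refine ⟨k, by simp; omega, by simp [PySem.List.enumerate, hx, hfold], ?_⟩
        rw [List.drop_append_of_le_length (by omega), hdrop, hTA]

-- ===== VERDICT (by name: the statement is the Claim_ definition above) =====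
theorem ranklist_to_string_spec : Claim_equal_ranklist_to_string := by
  intro l _
  show ranklist_to_string l = ranklist_to_string_alt l
  unfold ranklist_to_string ranklist_to_string_alt stripTrailA joinPartsB
  rw [foldA, slice_len_sub_one]
  by_cases hm : (-1 : Int) ∈ l
  · obtain ⟨k, hk, hfold, hdrop⟩ := (lastIdx_spec l).2 hm
    rw [hfold]
    have hkk : ((k : Int) + 1) = (((k + 1 : Nat) : Int)) := by push_cast; ring
    rw [hkk, PySem.List.slice_from_natCast, hdrop]
    have hne : ((k : Int)) ≠ -1 := by omega
    simp only [hm, hne, ne_eq, not_false_iff, if_pos]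
    exact congrArg String.ofList (dropLast_comma_renderC (tailAfter l))
  · rw [(lastIdx_spec l).1 hm]
    have h0 : (-1 : Int) + 1 = ((0 : Nat) : Int) := by norm_num
    rw [h0, PySem.List.slice_from_natCast, List.drop_zero, tailAfter_of_not_mem l hm]
    simp only [hm, List.nil_append, ne_eq, not_true_eq_false, if_neg, not_false_iff]
    exact congrArg String.ofList (dropLast_renderC l)
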